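-- pv_equiv track=rewrite | github.com/yzhao244/agentrun-sdk-python | agentrun/toolset/api/openapi.py | _render_path
-- ===== SOURCE A (Python) =====
-- from typing import Any, Dict, List, Optional, Tuple, Union
--
-- def _render_path(
--     path: str, expected_params: List[str], path_params: Dict[str, Any]
-- ) -> str:
--     rendered = path
--     missing = []
--     for name in expected_params:
--         if name not in path_params:
--             missing.append(name)
--             continue
--         rendered = rendered.replace(f"{{{name}}}", str(path_params[name]))
--
--     if missing:
--         raise ValueError(
--             f"Missing path parameters for {path}: {', '.join(missing)}"
--         )
--     return rendered
-- ===== SOURCE B (Python) =====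
-- from typing import Any, Dict, List
--
--
-- def _render_path(
--     path: str, expected_params: List[str], path_params: Dict[str, Any]
-- ) -> str:
--     missing = [name for name in expected_params if name not in path_params]
--     if missing:
--         raise ValueError(
--             f"Missing path parameters for {path}: {', '.join(missing)}"
--         )
--     if not expected_params:
--         return path
--     name, rest = expected_params[0], expected_params[1:]
--     # Tokenize the path by this placeholder and glue the pieces with the value,
--     # then recurse on the remaining parameters.
--     pieces = path.split("{" + name + "}")
--     return _render_path(str(path_params[name]).join(pieces), rest, path_params)
-- ===== Notes on version B (the rewrite author's own statement) =====
-- stated objective: alternative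
-- what changed: Replaces A's single accumulator loop of str.replace calls with a recursion on the parameter list that tokenizes the path via str.split on each placeholder and glues the pieces with str.join of the value, after an up-front validation pass that raises the identical ValueError.
import Mathlib
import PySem

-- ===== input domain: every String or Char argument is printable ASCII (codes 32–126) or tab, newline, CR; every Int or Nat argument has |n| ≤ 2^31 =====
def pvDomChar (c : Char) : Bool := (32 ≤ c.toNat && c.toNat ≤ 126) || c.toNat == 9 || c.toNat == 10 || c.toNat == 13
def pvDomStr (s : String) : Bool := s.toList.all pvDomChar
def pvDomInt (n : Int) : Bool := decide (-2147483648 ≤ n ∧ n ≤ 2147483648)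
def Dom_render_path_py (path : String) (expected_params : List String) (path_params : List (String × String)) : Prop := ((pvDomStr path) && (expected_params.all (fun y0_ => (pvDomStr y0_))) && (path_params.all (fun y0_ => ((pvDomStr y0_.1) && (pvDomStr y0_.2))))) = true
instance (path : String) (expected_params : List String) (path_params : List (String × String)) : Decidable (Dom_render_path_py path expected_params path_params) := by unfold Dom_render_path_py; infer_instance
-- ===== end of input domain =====

-- B re-renders by tokenizing the path with split on each placeholder and joining with the value (no str.replace), recursing on the parameter list; A = B wherever A returns (Pre_ excludes the ValueError inputs, where B raises identically).


-- ===== PORT A =====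
-- One loop over expected_params carrying (rendered, missing); if missing ≠ [] Python raises
-- ValueError (excluded by Pre_), else return rendered.
def render_path_py (path : String) (expected_params : List String) (path_params : List (String × String)) : String :=
  let d := PySem.Dict.ofList path_params
  let st := expected_params.foldl
    (fun (st : String × List String) name =>
      if !(d.contains name) then (st.1, st.2 ++ [name])
      else (PySem.Str.replace st.1 ("{" ++ name ++ "}") (d.getD name ""), st.2))
    (path, [])
  st.1

-- ===== PORT B =====
-- Validate (non-empty missing → ValueError, excluded by Pre_); then split the path on the
-- first parameter's placeholder, join the pieces with its value, and recurse on the rest.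
def render_path_py_alt (path : String) (expected_params : List String) (path_params : List (String × String)) : String :=
  let d := PySem.Dict.ofList path_params
  let missing := expected_params.filter (fun name => !(d.contains name))
  if missing ≠ [] then ""  -- ValueError in Python; unreachable under Pre_
  else
    match expected_params with
    | [] => path
    | name :: rest =>
        let pieces := (PySem.Str.split? path ("{" ++ name ++ "}")).getD []  -- sep never empty, so split? never none
        render_path_py_alt (PySem.Str.join (PySem.Dict.getD d name "") pieces) rest path_params

-- ===== PRECONDITION & SPEC =====
-- Pre_ excludes exactly the inputs where some expected name is absent from path_params:
-- there both A and B raise ValueError (with the same message).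
def Pre_render_path_py (path : String) (expected_params : List String) (path_params : List (String × String)) : Prop :=
  ∀ name ∈ expected_params, (PySem.Dict.ofList path_params).contains name = true
instance (path : String) (expected_params : List String) (path_params : List (String × String)) : Decidable (Pre_render_path_py path expected_params path_params) := by unfold Pre_render_path_py; infer_instance
def pvWitness_render_path_py : String × List String × (List (String × String)) :=
  ("/v1/items/{id}/sub/{s}", ["id", "s"], [("id", "7"), ("s", "x y")])

def Spec_render_path_py (path : String) (expected_params : List String) (path_params : List (String × String)) (out : String) : Prop := out = render_path_py_alt path expected_params path_params
instance (path : String) (expected_params : List String) (path_params : List (String × String)) (out : String) : Decidable (Spec_render_path_py path expected_params path_params out) := by unfold Spec_render_path_py; infer_instance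

-- ===== CLAIM (what is proved, stated in full; the proofs are below) =====
def Claim_equal_render_path_py : Prop := ∀ (path : String) (expected_params : List String) (path_params : List (String × String)), Dom_render_path_py path expected_params path_params → Pre_render_path_py path expected_params path_params → Spec_render_path_py path expected_params path_params (render_path_py path expected_params path_params)

-- ===== LEMMAS AND PROOFS =====

-- splitOn.go never produces the empty piece list.
theorem splitGo_ne_nil (sep : List Char) : ∀ (fuel : Nat) (l cur : List Char) (acc : List (List Char)), PySem.Chars.splitOn.go sep fuel l cur acc ≠ [] := by
  intro fuel
  induction fuel with
  | zero => intro l cur acc; rw [PySem.Chars.splitOn.go]; simp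
  | succ f ih =>
      intro l cur acc
      cases l with
      | nil => rw [PySem.Chars.splitOn.go]; simp; all_goals omega
      | cons c t =>
          rw [PySem.Chars.splitOn.go]
          split
          · exact ih _ _ _
          · exact ih _ _ _

-- The finished-pieces accumulator of splitOn.go peels off in front.
theorem splitGo_acc (sep : List Char) : ∀ (fuel : Nat) (l cur : List Char) (acc : List (List Char)), PySem.Chars.splitOn.go sep fuel l cur acc = acc.reverse ++ PySem.Chars.splitOn.go sep fuel l cur [] := by
  intro fuel
  induction fuel with
  | zero => intro l cur acc; rw [PySem.Chars.splitOn.go, PySem.Chars.splitOn.go]; simp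
  | succ f ih =>
      intro l cur acc
      cases l with
      | nil => rw [PySem.Chars.splitOn.go, PySem.Chars.splitOn.go]; simp; all_goals omega
      | cons c t =>
          rw [PySem.Chars.splitOn.go, PySem.Chars.splitOn.go]
          split
          · rw [ih _ _ (cur.reverse :: acc), ih _ _ [cur.reverse]]; simp
          · exact ih _ _ _

-- The current-piece accumulator of splitOn.go prefixes the first resulting piece.
theorem splitGo_cur (sep : List Char) : ∀ (fuel : Nat) (l cur : List Char), PySem.Chars.splitOn.go sep fuel l cur [] = (PySem.Chars.splitOn.go sep fuel l [] []).modifyHead (cur.reverse ++ ·) := by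
  intro fuel
  induction fuel with
  | zero => intro l cur; rw [PySem.Chars.splitOn.go, PySem.Chars.splitOn.go]; simp
  | succ f ih =>
      intro l cur
      cases l with
      | nil => rw [PySem.Chars.splitOn.go, PySem.Chars.splitOn.go]; simp; all_goals omega
      | cons c t =>
          rw [PySem.Chars.splitOn.go, PySem.Chars.splitOn.go]
          simp only [List.reverse_nil]
          split
          · rw [splitGo_acc sep f _ [] [cur.reverse], splitGo_acc sep f _ [] [[]]]
            rcases h : PySem.Chars.splitOn.go sep f (List.drop sep.length (c :: t)) [] [] with _ | ⟨p, pt⟩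
            · exact absurd h (splitGo_ne_nil sep _ _ _ _)
            · simp
          · rw [ih t (c :: cur), ih t [c]]
            rcases h : PySem.Chars.splitOn.go sep f t [] [] with _ | ⟨p, pt⟩
            · exact absurd h (splitGo_ne_nil sep _ _ _ _)
            · simp

-- splitOn.go is fuel-insensitive once the fuel covers the remaining input.
theorem splitGo_fuel (sep : List Char) (hsep : sep ≠ []) : ∀ (f1 : Nat) (l : List Char), l.length ≤ f1 → ∀ (f2 : Nat), l.length ≤ f2 → ∀ (cur : List Char) (acc : List (List Char)), PySem.Chars.splitOn.go sep f1 l cur acc = PySem.Chars.splitOn.go sep f2 l cur acc := by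
  intro f1
  induction f1 with
  | zero =>
      intro l hl f2 _ cur acc
      have : l = [] := List.eq_nil_of_length_eq_zero (Nat.le_zero.mp hl)
      subst this
      cases f2 with
      | zero => rfl
      | succ g => rw [PySem.Chars.splitOn.go, PySem.Chars.splitOn.go]; simp; all_goals omega
  | succ f ih =>
      intro l hl f2 hl2 cur acc
      cases l with
      | nil =>
          cases f2 with
          | zero => rw [PySem.Chars.splitOn.go, PySem.Chars.splitOn.go]; simp; all_goals omega
          | succ g => rw [PySem.Chars.splitOn.go, PySem.Chars.splitOn.go]; all_goals omega
      | cons c t =>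
          cases f2 with
          | zero => simp at hl2
          | succ g =>
              rw [PySem.Chars.splitOn.go, PySem.Chars.splitOn.go]
              have hsl : 1 ≤ sep.length := List.length_pos_iff.mpr hsep
              split
              · apply ih
                · simp only [List.length_drop, List.length_cons] at *; omega
                · simp only [List.length_drop, List.length_cons] at *; omega
              · apply ih
                · simp only [List.length_cons] at hl; omega
                · simp only [List.length_cons] at hl2; omega

-- join distributes over a prefix added to the first piece.
theorem join_modifyHead (sep a : List Char) (ps : List (List Char)) (h : ps ≠ []) : PySem.Chars.join sep (ps.modifyHead (a ++ ·)) = a ++ PySem.Chars.join sep ps := by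
  rcases ps with _ | ⟨p, _ | ⟨q, rest⟩⟩
  · exact absurd rfl h
  · simp [PySem.Chars.join_singleton]
  · simp [PySem.Chars.join_cons_cons, List.append_assoc]

-- replace.go computes racc.reverse ++ (new-joined pieces of splitOn.go), fuel for fuel.
theorem replaceGo_join (old new : List Char) (hold : old ≠ []) : ∀ (f : Nat) (l : List Char), l.length ≤ f → ∀ (racc : List Char), PySem.Chars.replace.go old new f l racc = racc.reverse ++ PySem.Chars.join new (PySem.Chars.splitOn.go old f l [] []) := by
  intro f
  induction f with
  | zero =>
      intro l hl racc
      have : l = [] := List.eq_nil_of_length_eq_zero (Nat.le_zero.mp hl)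
      subst this
      rw [PySem.Chars.replace.go, PySem.Chars.splitOn.go]
      simp [PySem.Chars.join_singleton]
  | succ f ih =>
      intro l hl racc
      cases l with
      | nil =>
          rw [PySem.Chars.replace.go, PySem.Chars.splitOn.go]
          simp [PySem.Chars.join_singleton]
          all_goals omega
      | cons c t =>
          rw [PySem.Chars.replace.go, PySem.Chars.splitOn.go]
          simp only [List.reverse_nil]
          split
          · have hdrop : (List.drop old.length (c :: t)).length ≤ f := by
              have : 1 ≤ old.length := List.length_pos_iff.mpr hold
              simp only [List.length_drop, List.length_cons] at *
              omega
            rw [ih _ hdrop]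
            rw [splitGo_acc old f _ [] [[]]]
            rcases h : PySem.Chars.splitOn.go old f (List.drop old.length (c :: t)) [] [] with _ | ⟨p, pt⟩
            · exact absurd h (splitGo_ne_nil old _ _ _ _)
            · simp [PySem.Chars.join_cons_cons, List.append_assoc]
          · have ht : t.length ≤ f := by simp only [List.length_cons] at hl; omega
            rw [ih _ ht]
            rw [splitGo_cur old f t [c]]
            simp only [List.reverse_cons, List.reverse_nil, List.nil_append]
            rw [join_modifyHead new [c] _ (splitGo_ne_nil old _ _ _ _)]
            simp

-- Python identity: s.replace(old, new) == new.join(s.split(old)) for non-empty old (char level).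
theorem chars_replace_eq_join_splitOn (cs old new : List Char) (h : old ≠ []) : PySem.Chars.replace cs old new = PySem.Chars.join new (PySem.Chars.splitOn cs old) := by
  rw [PySem.Chars.replace, PySem.Chars.splitOn]
  rw [if_neg (by simpa using h)]
  rw [replaceGo_join old new h cs.length cs le_rfl []]
  rw [splitGo_fuel old h cs.length cs le_rfl (cs.length + 1) (by omega)]
  simp

-- The same identity at String level, in the shape B's port uses.
theorem str_replace_eq_join_split (s pat val : String) (h : pat.toList ≠ []) :
    PySem.Str.replace s pat val = PySem.Str.join val ((PySem.Str.split? s pat).getD []) := by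
  rw [PySem.Str.replace, PySem.Str.join, PySem.Str.split?, PySem.Chars.split?]
  rw [if_neg (by simpa using h)]
  simp only [Option.map_some, Option.getD_some, List.map_map]
  rw [chars_replace_eq_join_splitOn s.toList pat.toList val.toList h]
  congr 1
  congr 1
  simp [Function.comp_def]

-- "{" ++ name ++ "}" is never the empty string.
theorem placeholder_ne_nil (name : String) : ("{" ++ name ++ "}").toList ≠ [] := by
  simp [String.toList_append]

-- When every name is present, A's combined fold never touches `missing` and computes
-- exactly the sequential-replace fold.
theorem render_fold_eq (d : PySem.Dict String String) (names : List String) (r : String) (ms : List String)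
    (h : ∀ name ∈ names, d.contains name = true) :
    names.foldl
      (fun (st : String × List String) name =>
        if !(d.contains name) then (st.1, st.2 ++ [name])
        else (PySem.Str.replace st.1 ("{" ++ name ++ "}") (d.getD name ""), st.2))
      (r, ms)
    = (names.foldl
        (fun rendered name => PySem.Str.replace rendered ("{" ++ name ++ "}") (d.getD name ""))
        r, ms) := by
  induction names generalizing r with
  | nil => rfl
  | cons n ns ih =>
      have hn : d.contains n = true := h n (List.mem_cons_self ..)
      simp only [List.foldl_cons, hn, Bool.not_true, Bool.false_eq_true, if_false]
      exact ih _ (fun name hm => h name (List.mem_cons_of_mem _ hm))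

theorem missing_nil (d : PySem.Dict String String) (names : List String)
    (h : ∀ name ∈ names, d.contains name = true) :
    names.filter (fun name => !(d.contains name)) = [] := by
  simp only [List.filter_eq_nil_iff]
  intro n hn
  simp [h n hn]

-- B's split/join recursion computes the sequential-replace fold.
theorem alt_eq_fold (path_params : List (String × String)) (names : List String) (r : String)
    (h : ∀ name ∈ names, (PySem.Dict.ofList path_params).contains name = true) :
    render_path_py_alt r names path_params
    = names.foldl
        (fun rendered name => PySem.Str.replace rendered ("{" ++ name ++ "}") ((PySem.Dict.ofList path_params).getD name ""))
        r := by
  induction names generalizing r with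
  | nil => rfl
  | cons n ns ih =>
      rw [render_path_py_alt]
      simp only [missing_nil _ _ h, ne_eq, not_true_eq_false, if_false, List.foldl_cons]
      rw [ih _ (fun name hm => h name (List.mem_cons_of_mem _ hm))]
      rw [str_replace_eq_join_split r ("{" ++ n ++ "}") _ (placeholder_ne_nil n)]

-- ===== VERDICT (by name: the statement is the Claim_ definition above) =====
theorem render_path_py_spec : Claim_equal_render_path_py := by
  intro path expected_params path_params _ hpre
  unfold Spec_render_path_py render_path_py
  simp only [render_fold_eq _ _ _ _ hpre]
  exact (alt_eq_fold path_params expected_params path hpre).symm
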